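-- pv_equiv track=rewrite | github.com/ThomasSatory/Agroporc | plats-du-jour/agent/feedback_agent.py | _merge_retours
-- ===== SOURCE A (Python) =====
-- MAX_RETOURS_PAR_PERSONNAGE = 20
--
-- def _merge_retours(existants: list[dict], nouveaux: list[dict]) -> list[dict]:
--     """Fusionne sans doublons, en conservant l'ordre et en tronquant au max."""
--     seen = set()
--     merged: list[dict] = []
--
--     def _key(r: dict) -> tuple:
--         return (
--             r.get("date", ""),
--             r.get("ai_texte", ""),
--             r.get("human_auteur", ""),
--             r.get("human_texte", ""),
--         )
--
--     for r in existants + nouveaux: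
--         k = _key(r)
--         if k in seen:
--             continue
--         seen.add(k)
--         merged.append(r)
--
--     # Garder les N plus récents (tri par date desc puis ordre d'insertion stable)
--     merged.sort(key=lambda r: r.get("date", ""), reverse=True)
--     return merged[:MAX_RETOURS_PAR_PERSONNAGE]
-- ===== SOURCE B (Python) =====
-- MAX_RETOURS_PAR_PERSONNAGE = 20
--
-- def _merge_retours(existants: list[dict], nouveaux: list[dict]) -> list[dict]:
--     """Group records into per-date buckets (first occurrence per key wins inside a
--     bucket), then sort only the distinct dates descending and concatenate the
--     buckets, truncating to the max."""
--     buckets: dict = {}  # date -> {rest-key: record}, insertion order kept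
--     for r in existants + nouveaux:
--         b = buckets.setdefault(r.get("date", ""), {})
--         k = (r.get("ai_texte", ""), r.get("human_auteur", ""), r.get("human_texte", ""))
--         if k not in b:
--             b[k] = r
--     out: list[dict] = []
--     for d in sorted(buckets, reverse=True):
--         out.extend(buckets[d].values())
--     return out[:MAX_RETOURS_PAR_PERSONNAGE]
-- ===== Notes on version B (the rewrite author's own statement) =====
-- stated objective: alternative
-- what changed: B replaces A's global seen-set dedup followed by a stable sort of all n records with a single grouping pass into per-date buckets (a dict of first-wins inner dicts keyed by the remaining three fields); only the k distinct dates are sorted, and the buckets are concatenated in that order before truncating.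
import Mathlib
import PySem

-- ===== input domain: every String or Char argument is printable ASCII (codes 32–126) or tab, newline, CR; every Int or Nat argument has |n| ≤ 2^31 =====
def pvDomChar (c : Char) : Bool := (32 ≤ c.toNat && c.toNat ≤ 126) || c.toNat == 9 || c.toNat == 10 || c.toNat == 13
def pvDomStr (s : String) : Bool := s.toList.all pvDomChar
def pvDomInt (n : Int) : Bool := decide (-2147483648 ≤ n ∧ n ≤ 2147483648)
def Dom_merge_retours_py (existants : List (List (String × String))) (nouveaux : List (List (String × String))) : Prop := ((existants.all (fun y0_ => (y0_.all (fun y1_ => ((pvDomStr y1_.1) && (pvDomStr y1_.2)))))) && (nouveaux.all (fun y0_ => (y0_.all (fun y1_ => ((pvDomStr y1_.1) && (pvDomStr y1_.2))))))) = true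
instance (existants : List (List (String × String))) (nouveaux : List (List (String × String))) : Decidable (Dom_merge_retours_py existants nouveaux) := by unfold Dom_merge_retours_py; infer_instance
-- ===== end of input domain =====

-- B replaces A's global dedup-set + full stable sort by per-date buckets of first-wins
-- inner dicts, sorting only the distinct dates (objective: alternative decomposition).

-- ===== PORT A =====
-- A's local helper _key(r)
def pvKeyA (r : List (String × String)) : String × String × String × String :=
  ((PySem.Dict.mk r).getD "date" "", (PySem.Dict.mk r).getD "ai_texte" "",
   (PySem.Dict.mk r).getD "human_auteur" "", (PySem.Dict.mk r).getD "human_texte" "")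

-- MAX_RETOURS_PAR_PERSONNAGE = 20 is inlined as the literal 20 in the slice.
def merge_retours_py (existants : List (List (String × String))) (nouveaux : List (List (String × String))) : List (List (String × String)) :=
  PySem.List.slice
    (PySem.List.sorted
      (((existants ++ nouveaux).foldl
          (fun (st : PySem.Set (String × String × String × String) × List (List (String × String))) r =>
            if PySem.Set.contains st.1 (pvKeyA r) then st
            else (PySem.Set.add st.1 (pvKeyA r), st.2 ++ [r]))
          (PySem.Set.empty, [])).2)
      (fun r => (PySem.Dict.mk r).getD "date" "") true)
    none (some 20)

-- ===== PORT B =====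
-- B's per-record fields: the date and the key tuple k = (ai_texte, human_auteur, human_texte)
def pvRest (r : List (String × String)) : String × String × String :=
  ((PySem.Dict.mk r).getD "ai_texte" "", (PySem.Dict.mk r).getD "human_auteur" "",
   (PySem.Dict.mk r).getD "human_texte" "")

-- Python's aliased in-place mutation 'b = buckets.setdefault(d, {}); b[k] = r' is ported
-- functionally: after the setdefault, re-insert the grown inner dict under d (same items order).
def merge_retours_py_alt (existants : List (List (String × String))) (nouveaux : List (List (String × String))) : List (List (String × String)) :=
  let buckets := (existants ++ nouveaux).foldl
    (fun (bk : PySem.Dict String (PySem.Dict (String × String × String) (List (String × String)))) r =>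
      let bk1 := PySem.Dict.setdefault bk ((PySem.Dict.mk r).getD "date" "") PySem.Dict.empty
      let b := bk1.getD ((PySem.Dict.mk r).getD "date" "") PySem.Dict.empty
      if b.contains (pvRest r) then bk1
      else PySem.Dict.insert bk1 ((PySem.Dict.mk r).getD "date" "")
        (PySem.Dict.mk (b.items ++ [(pvRest r, r)])))
    PySem.Dict.empty
  let out := (PySem.List.sorted buckets.keys (fun x => x) true).foldl
    (fun acc d => acc ++ (buckets.getD d PySem.Dict.empty).values) []
  PySem.List.slice out none (some 20)

-- ===== PRECONDITION & SPEC =====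
def Spec_merge_retours_py (existants : List (List (String × String))) (nouveaux : List (List (String × String))) (out : List (List (String × String))) : Prop := out = merge_retours_py_alt existants nouveaux
instance (existants : List (List (String × String))) (nouveaux : List (List (String × String))) (out : List (List (String × String))) : Decidable (Spec_merge_retours_py existants nouveaux out) := by unfold Spec_merge_retours_py; infer_instance

-- ===== CLAIM (what is proved, stated in full; the proofs are below) =====
def Claim_equal_merge_retours_py : Prop := ∀ (existants : List (List (String × String))) (nouveaux : List (List (String × String))), Dom_merge_retours_py existants nouveaux → Spec_merge_retours_py existants nouveaux (merge_retours_py existants nouveaux)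

-- ===== LEMMAS AND PROOFS =====

def pvDate (r : List (String × String)) : String := (PySem.Dict.mk r).getD "date" ""

def pvBefore (a b : List (String × String)) : Bool := decide (pvDate b < pvDate a)

-- keep-first dedup by the full 4-tuple key, filter-recursion form
def pvDedup : List (List (String × String)) → List (List (String × String))
  | [] => []
  | x :: xs => x :: pvDedup (xs.filter (fun y => !(pvKeyA y == pvKeyA x)))
  termination_by l => l.length
  decreasing_by
    simp
    exact le_trans (List.length_filter_le _ _) (le_of_eq (List.length_attach))

-- keep-first dedup by the 3-tuple rest key (what one bucket of B maintains)
def pvDedupR : List (List (String × String)) → List (List (String × String))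
  | [] => []
  | x :: xs => x :: pvDedupR (xs.filter (fun y => !(pvRest y == pvRest x)))
  termination_by l => l.length
  decreasing_by
    simp
    exact le_trans (List.length_filter_le _ _) (le_of_eq (List.length_attach))

lemma pv_date_lam : (fun r : List (String × String) => (PySem.Dict.mk r).getD "date" "") = pvDate := rfl

lemma pv_keyA_pair (r : List (String × String)) : pvKeyA r = (pvDate r, pvRest r) := rfl

lemma pvDedup_nil : pvDedup [] = [] := by rw [pvDedup.eq_def]

lemma pvDedup_cons (x : List (String × String)) (xs : List (List (String × String))) :
    pvDedup (x :: xs) = x :: pvDedup (xs.filter (fun y => !(pvKeyA y == pvKeyA x))) := by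
  rw [pvDedup.eq_def]

lemma pvDedupR_nil : pvDedupR [] = [] := by rw [pvDedupR.eq_def]

lemma pvDedupR_cons (x : List (String × String)) (xs : List (List (String × String))) :
    pvDedupR (x :: xs) = x :: pvDedupR (xs.filter (fun y => !(pvRest y == pvRest x))) := by
  rw [pvDedupR.eq_def]

lemma pvDedup_subset : ∀ (n : Nat) (M : List (List (String × String))), M.length ≤ n →
    ∀ x ∈ pvDedup M, x ∈ M := by
  intro n
  induction n with
  | zero =>
    intro M hlen x hx
    have hm : M = [] := List.length_eq_zero_iff.mp (Nat.le_zero.mp hlen)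
    subst hm; rw [pvDedup_nil] at hx; simp at hx
  | succ n ih =>
    intro M hlen x hx
    cases M with
    | nil => rw [pvDedup_nil] at hx; simp at hx
    | cons m ms =>
      rw [pvDedup_cons] at hx
      rcases List.mem_cons.mp hx with h | h
      · exact h ▸ List.mem_cons_self
      · exact List.mem_cons_of_mem _ (List.mem_of_mem_filter
          (ih _ (le_trans (List.length_filter_le _ _) (Nat.le_of_succ_le_succ hlen)) x h))

lemma pvDedupR_subset : ∀ (n : Nat) (M : List (List (String × String))), M.length ≤ n →
    ∀ x ∈ pvDedupR M, x ∈ M := by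
  intro n
  induction n with
  | zero =>
    intro M hlen x hx
    have hm : M = [] := List.length_eq_zero_iff.mp (Nat.le_zero.mp hlen)
    subst hm; rw [pvDedupR_nil] at hx; simp at hx
  | succ n ih =>
    intro M hlen x hx
    cases M with
    | nil => rw [pvDedupR_nil] at hx; simp at hx
    | cons m ms =>
      rw [pvDedupR_cons] at hx
      rcases List.mem_cons.mp hx with h | h
      · exact h ▸ List.mem_cons_self
      · exact List.mem_cons_of_mem _ (List.mem_of_mem_filter
          (ih _ (le_trans (List.length_filter_le _ _) (Nat.le_of_succ_le_succ hlen)) x h))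

-- on a list of records sharing one date, rest-key dedup and 4-key dedup coincide
lemma pvDedupR_eq_pvDedup : ∀ (n : Nat) (M : List (List (String × String))) (c : String),
    M.length ≤ n → (∀ r ∈ M, pvDate r = c) → pvDedupR M = pvDedup M := by
  intro n
  induction n with
  | zero =>
    intro M c hlen _
    have hm : M = [] := List.length_eq_zero_iff.mp (Nat.le_zero.mp hlen)
    subst hm; rw [pvDedupR_nil, pvDedup_nil]
  | succ n ih =>
    intro M c hlen hall
    cases M with
    | nil => rw [pvDedupR_nil, pvDedup_nil]
    | cons m ms =>
      rw [pvDedupR_cons, pvDedup_cons]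
      have hfe : ms.filter (fun y => !(pvRest y == pvRest m))
          = ms.filter (fun y => !(pvKeyA y == pvKeyA m)) := by
        apply List.filter_congr
        intro y hy
        have h1 : pvDate y = c := hall y (List.mem_cons_of_mem _ hy)
        have h2 : pvDate m = c := hall m List.mem_cons_self
        simp [pv_keyA_pair, Prod.ext_iff, h1, h2]
      rw [hfe, ih _ c (le_trans (List.length_filter_le _ _) (Nat.le_of_succ_le_succ hlen))
            (fun r hr => hall r (List.mem_cons_of_mem _ (List.mem_of_mem_filter hr)))]

-- a rest-key already present in the list is absorbed by pvDedupR when appended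
lemma pv_dedupR_append_dup (x : List (String × String)) :
    ∀ (n : Nat) (xs : List (List (String × String))), xs.length ≤ n →
    (∃ y ∈ xs, pvRest y = pvRest x) → pvDedupR (xs ++ [x]) = pvDedupR xs := by
  intro n
  induction n with
  | zero =>
    intro xs hlen hex
    have hm : xs = [] := List.length_eq_zero_iff.mp (Nat.le_zero.mp hlen)
    subst hm; simp at hex
  | succ n ih =>
    intro xs hlen hex
    cases xs with
    | nil => simp at hex
    | cons z xs' =>
      obtain ⟨y, hymem, hykey⟩ := hex
      rw [List.cons_append, pvDedupR_cons, pvDedupR_cons, List.filter_append]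
      by_cases hk : pvRest x = pvRest z
      · have h1 : ([x].filter (fun w => !(pvRest w == pvRest z))) = [] := by
          simp [hk]
        rw [h1, List.append_nil]
      · have h1 : ([x].filter (fun w => !(pvRest w == pvRest z))) = [x] := by
          simp [hk]
        rw [h1]
        have hy' : y ∈ xs' := by
          rcases List.mem_cons.mp hymem with h | h
          · exact absurd (h ▸ hykey).symm hk
          · exact h
        have hymem' : y ∈ xs'.filter (fun w => !(pvRest w == pvRest z)) := by
          apply List.mem_filter.mpr
          refine ⟨hy', ?_⟩
          simp only [Bool.not_eq_eq_eq_not, Bool.not_true, beq_eq_false_iff_ne]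
          exact fun h => hk (hykey ▸ h : pvRest x = pvRest z)
        have hlen' : (xs'.filter (fun w => !(pvRest w == pvRest z))).length ≤ n :=
          le_trans (List.length_filter_le _ _) (Nat.le_of_succ_le_succ hlen)
        rw [ih _ hlen' ⟨y, hymem', hykey⟩]

lemma pv_dedupR_append_fresh (x : List (String × String)) :
    ∀ (n : Nat) (xs : List (List (String × String))), xs.length ≤ n →
    (∀ y ∈ xs, pvRest y ≠ pvRest x) → pvDedupR (xs ++ [x]) = pvDedupR xs ++ [x] := by
  intro n
  induction n with
  | zero =>
    intro xs hlen _
    have hm : xs = [] := List.length_eq_zero_iff.mp (Nat.le_zero.mp hlen)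
    subst hm
    rw [List.nil_append, pvDedupR_nil, pvDedupR_cons, List.filter_nil, pvDedupR_nil, List.nil_append]
  | succ n ih =>
    intro xs hlen hfresh
    cases xs with
    | nil =>
      rw [List.nil_append, pvDedupR_nil, pvDedupR_cons, List.filter_nil, pvDedupR_nil,
          List.nil_append]
    | cons z xs' =>
      rw [List.cons_append, pvDedupR_cons, pvDedupR_cons, List.filter_append]
      have hk : pvRest x ≠ pvRest z := fun h => hfresh z List.mem_cons_self h.symm
      have h1 : ([x].filter (fun w => !(pvRest w == pvRest z))) = [x] := by
        simp [hk]
      rw [h1]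
      have hlen' : (xs'.filter (fun w => !(pvRest w == pvRest z))).length ≤ n :=
        le_trans (List.length_filter_le _ _) (Nat.le_of_succ_le_succ hlen)
      rw [ih _ hlen' (fun w hw => hfresh w (List.mem_cons_of_mem _ (List.mem_of_mem_filter hw)))]
      simp

-- pvDedupR keeps a witness of every rest-key of the list
lemma pvDedupR_key_surj : ∀ (n : Nat) (M : List (List (String × String))) (c : String × String × String),
    M.length ≤ n → (∃ y ∈ M, pvRest y = c) → ∃ z ∈ pvDedupR M, pvRest z = c := by
  intro n
  induction n with
  | zero =>
    intro M c hlen hex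
    have hm : M = [] := List.length_eq_zero_iff.mp (Nat.le_zero.mp hlen)
    subst hm; simp at hex
  | succ n ih =>
    intro M c hlen hex
    cases M with
    | nil => simp at hex
    | cons m ms =>
      rw [pvDedupR_cons]
      by_cases hm : pvRest m = c
      · exact ⟨m, List.mem_cons_self, hm⟩
      · obtain ⟨y, hymem, hykey⟩ := hex
        have hy' : y ∈ ms := by
          rcases List.mem_cons.mp hymem with h | h
          · exact absurd (h ▸ hykey) hm
          · exact h
        have hymem' : y ∈ ms.filter (fun w => !(pvRest w == pvRest m)) := by
          apply List.mem_filter.mpr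
          refine ⟨hy', ?_⟩
          simp only [Bool.not_eq_eq_eq_not, Bool.not_true, beq_eq_false_iff_ne]
          exact fun h => hm (h ▸ hykey)
        obtain ⟨z, hz, hzc⟩ := ih _ c
          (le_trans (List.length_filter_le _ _) (Nat.le_of_succ_le_succ hlen)) ⟨y, hymem', hykey⟩
        exact ⟨z, List.mem_cons_of_mem _ hz, hzc⟩

-- filtering by a predicate that factors through the 4-key commutes with pvDedup
lemma pv_filter_dedup (p : List (String × String) → Bool)
    (hp : ∀ a b, pvKeyA a = pvKeyA b → p a = p b) :
    ∀ (n : Nat) (M : List (List (String × String))), M.length ≤ n →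
    (pvDedup M).filter p = pvDedup (M.filter p) := by
  intro n
  induction n with
  | zero =>
    intro M hlen
    have hm : M = [] := List.length_eq_zero_iff.mp (Nat.le_zero.mp hlen)
    subst hm; rw [pvDedup_nil, List.filter_nil, pvDedup_nil]
  | succ n ih =>
    intro M hlen
    cases M with
    | nil => rw [pvDedup_nil, List.filter_nil, pvDedup_nil]
    | cons m ms =>
      have hlen' : ∀ (q : List (String × String) → Bool), (ms.filter q).length ≤ n :=
        fun q => le_trans (List.length_filter_le _ _) (Nat.le_of_succ_le_succ hlen)
      rw [pvDedup_cons, List.filter_cons, List.filter_cons]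
      by_cases hm : p m = true
      · rw [if_pos hm, if_pos hm, pvDedup_cons,
            ih _ (hlen' _), List.filter_filter, List.filter_filter]
        congr 1
        apply congrArg
        apply List.filter_congr
        intro y _
        exact Bool.and_comm _ _
      · have hm' : p m = false := Bool.eq_false_iff.mpr hm
        rw [if_neg (by rw [hm']; simp), if_neg (by rw [hm']; simp), ih _ (hlen' _),
            List.filter_filter]
        apply congrArg
        have : ms.filter (fun a => p a && !(pvKeyA a == pvKeyA m)) = ms.filter p := by
          apply List.filter_congr
          intro y _
          by_cases hk : pvKeyA y = pvKeyA m
          · have : p y = false := (hp y m hk).trans hm'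
            simp [this]
          · simp [hk]
        rw [this]

lemma pvBefore_true_iff (a b : List (String × String)) : pvBefore a b = true ↔ pvDate b < pvDate a := by
  simp [pvBefore]

lemma pv_insertBy_nil (x : List (String × String)) : PySem.List.insertBy pvBefore x [] = [x] := by
  simp [PySem.List.insertBy]

lemma pv_insertBy_cons (x y : List (String × String)) (ys : List (List (String × String))) :
    PySem.List.insertBy pvBefore x (y :: ys) =
      if pvBefore x y then x :: y :: ys else y :: PySem.List.insertBy pvBefore x ys := by
  simp [PySem.List.insertBy]

lemma pv_insertBy_all_before (x : List (String × String)) (l : List (List (String × String)))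
    (h : ∀ z ∈ l, pvBefore x z = true) : PySem.List.insertBy pvBefore x l = x :: l := by
  cases l with
  | nil => exact pv_insertBy_nil x
  | cons z zs => rw [pv_insertBy_cons, if_pos (h z (List.mem_cons_self))]

lemma pv_insertBy_skip (x : List (String × String)) :
    ∀ (l1 l2 : List (List (String × String))), (∀ z ∈ l1, pvBefore x z = false) →
    PySem.List.insertBy pvBefore x (l1 ++ l2) = l1 ++ PySem.List.insertBy pvBefore x l2 := by
  intro l1
  induction l1 with
  | nil => intro l2 _; rw [List.nil_append, List.nil_append]
  | cons z l1' ih =>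
    intro l2 h
    rw [List.cons_append, pv_insertBy_cons, if_neg (by rw [h z List.mem_cons_self]; simp),
        ih l2 (fun w hw => h w (List.mem_cons_of_mem _ hw)), List.cons_append]

def pvBucket (M : List (List (String × String))) (d : String) : List (List (String × String)) :=
  M.filter (fun r => pvDate r == d)

lemma pv_flatMap_congr {α β : Type} (l : List α) (f g : α → List β)
    (h : ∀ a ∈ l, f a = g a) : l.flatMap f = l.flatMap g := by
  induction l with
  | nil => rfl
  | cons a l ih =>
    rw [List.flatMap_cons, List.flatMap_cons, h a List.mem_cons_self,
        ih (fun b hb => h b (List.mem_cons_of_mem _ hb))]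

lemma pv_bucket_append (M : List (List (String × String))) (x : List (String × String)) (d : String) :
    pvBucket (M ++ [x]) d = pvBucket M d ++ (if pvDate x = d then [x] else []) := by
  unfold pvBucket
  rw [List.filter_append]
  congr 1
  by_cases h : pvDate x = d <;> simp [h]

lemma pv_bucket_mem_date (M : List (List (String × String))) (d : String) :
    ∀ r ∈ pvBucket M d, pvDate r = d := by
  intro r hr
  have := (List.mem_filter.mp hr).2
  simpa using this

-- inserting x into a date-bucketed concatenation appends it to its own bucket
lemma pv_insertBy_flatMap (x : List (String × String)) :
    ∀ (ds : List String), ds.Pairwise (fun a b => b < a) → pvDate x ∈ ds →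
    ∀ (M : List (List (String × String))),
    PySem.List.insertBy pvBefore x (ds.flatMap (pvBucket M)) = ds.flatMap (pvBucket (M ++ [x])) := by
  intro ds
  induction ds with
  | nil => intro _ hx; simp at hx
  | cons d ds' ih =>
    intro hpw hx M
    rw [List.pairwise_cons] at hpw
    obtain ⟨hd, hpw'⟩ := hpw
    rw [List.flatMap_cons, List.flatMap_cons]
    by_cases h : pvDate x = d
    · have hskip : ∀ z ∈ pvBucket M d, pvBefore x z = false := by
        intro z hz
        have hz' := pv_bucket_mem_date M d z hz
        simp [pvBefore, hz', h]
      have hall : ∀ z ∈ ds'.flatMap (pvBucket M), pvBefore x z = true := by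
        intro z hz
        obtain ⟨d', hd', hzd'⟩ := List.mem_flatMap.mp hz
        have hz' := pv_bucket_mem_date M d' z hzd'
        rw [pvBefore_true_iff, hz', h]
        exact hd d' hd'
      rw [pv_insertBy_skip x _ _ hskip, pv_insertBy_all_before x _ hall,
          pv_bucket_append, if_pos h]
      have hrest : ds'.flatMap (pvBucket (M ++ [x])) = ds'.flatMap (pvBucket M) := by
        apply pv_flatMap_congr
        intro d' hd'
        rw [pv_bucket_append, if_neg (show ¬ pvDate x = d' by
              intro hc
              have hlt := hd d' hd'
              rw [← hc, ← h] at hlt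
              exact lt_irrefl _ hlt),
            List.append_nil]
      rw [hrest]
      simp
    · have hx' : pvDate x ∈ ds' := by
        rcases List.mem_cons.mp hx with hc | hc
        · exact absurd hc h
        · exact hc
      have hskip : ∀ z ∈ pvBucket M d, pvBefore x z = false := by
        intro z hz
        have hz' := pv_bucket_mem_date M d z hz
        have hlt : pvDate x < d := hd _ hx'
        simp only [pvBefore, hz']
        simp [not_lt_of_gt hlt]
      rw [pv_insertBy_skip x _ _ hskip, ih hpw' hx' M,
          pv_bucket_append, if_neg h, List.append_nil]

lemma pv_sorted_append (L : List (List (String × String))) (x : List (String × String)) :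
    PySem.List.sorted (L ++ [x]) pvDate true =
      PySem.List.insertBy pvBefore x (PySem.List.sorted L pvDate true) := by
  rw [PySem.List.sorted_rev_eq_foldl_insertBy, PySem.List.sorted_rev_eq_foldl_insertBy,
      List.foldl_append]
  rfl

-- MAIN sort lemma: a stable date-descending sort is the concatenation of the date buckets
-- listed along any strictly descending date list covering the records
lemma pv_sorted_flatMap : ∀ (M : List (List (String × String))) (ds : List String),
    ds.Pairwise (fun a b => b < a) → (∀ r ∈ M, pvDate r ∈ ds) →
    PySem.List.sorted M pvDate true = ds.flatMap (pvBucket M) := by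
  intro M
  induction M using List.reverseRecOn with
  | nil =>
    intro ds _ _
    have h0 : PySem.List.sorted ([] : List (List (String × String))) pvDate true = [] := rfl
    rw [h0]
    have : ds.flatMap (pvBucket []) = ds.flatMap (fun _ => []) :=
      pv_flatMap_congr _ _ _ (fun d _ => rfl)
    rw [this]
    simp
  | append_singleton M x ih =>
    intro ds hpw hmem
    rw [pv_sorted_append, ih ds hpw (fun r hr => hmem r (List.mem_append_left _ hr)),
        pv_insertBy_flatMap x ds hpw (hmem x (List.mem_append_right _ List.mem_cons_self))]

-- Bool-level membership facts for A's seen-set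
lemma pv_contains_iff (s : PySem.Set (String × String × String × String))
    (a : String × String × String × String) :
    PySem.Set.contains s a = true ↔ a ∈ s := by
  show List.contains s a = true ↔ a ∈ s
  simp

lemma pv_set_contains_add (s : PySem.Set (String × String × String × String))
    (k a : String × String × String × String) :
    PySem.Set.contains (PySem.Set.add s k) a
      = (PySem.Set.contains s a || decide (a = k)) := by
  by_cases hk : PySem.Set.contains s k = true
  · have hkm : k ∈ s := (pv_contains_iff s k).mp hk
    rw [show PySem.Set.add s k = s from by simp [PySem.Set.add, hkm]]
    by_cases hak : a = k
    · subst hak; simp [(pv_contains_iff s a).mp hk]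
    · simp [hak]
  · have hkm : k ∉ s := fun hm => hk ((pv_contains_iff s k).mpr hm)
    rw [show PySem.Set.add s k = s ++ [k] from by simp [PySem.Set.add, hkm]]
    by_cases hak : a = k
    · subst hak; simp [PySem.Set.contains]
    · simp [PySem.Set.contains, hak]

-- A's loop: seen-set accumulation is keep-first dedup of the not-yet-seen part
lemma pv_loopA : ∀ (xs : List (List (String × String)))
    (seen : PySem.Set (String × String × String × String)) (acc : List (List (String × String))),
    (xs.foldl
      (fun (st : PySem.Set (String × String × String × String) × List (List (String × String))) r =>
        if PySem.Set.contains st.1 (pvKeyA r) then st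
        else (PySem.Set.add st.1 (pvKeyA r), st.2 ++ [r]))
      (seen, acc)).2
    = acc ++ pvDedup (xs.filter (fun r => !(PySem.Set.contains seen (pvKeyA r)))) := by
  intro xs
  induction xs with
  | nil => intro seen acc; rw [List.foldl_nil, List.filter_nil, pvDedup_nil, List.append_nil]
  | cons r xs ih =>
    intro seen acc
    by_cases hc : PySem.Set.contains seen (pvKeyA r) = true
    · rw [List.foldl_cons, if_pos hc, ih, List.filter_cons,
          if_neg (show ¬((!PySem.Set.contains seen (pvKeyA r)) = true) by rw [hc]; simp)]
    · have hc' : PySem.Set.contains seen (pvKeyA r) = false := Bool.eq_false_iff.mpr hc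
      rw [List.foldl_cons, if_neg hc, ih, List.filter_cons,
          if_pos (show (!PySem.Set.contains seen (pvKeyA r)) = true by rw [hc']; rfl),
          pvDedup_cons, List.filter_filter]
      have hfe : xs.filter (fun y => !(PySem.Set.contains (PySem.Set.add seen (pvKeyA r)) (pvKeyA y)))
          = xs.filter (fun y => (!(pvKeyA y == pvKeyA r)) && (!(PySem.Set.contains seen (pvKeyA y)))) := by
        apply List.filter_congr
        intro y _
        rw [pv_set_contains_add]
        by_cases hyk : pvKeyA y = pvKeyA r
        · simp [hyk]
        · simp [hyk]
      rw [hfe]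
      simp

-- ---- B side: the bucket-building fold ----

-- the step function of B's grouping loop, with the locals bk1 and b written out
def pvStep (bk : PySem.Dict String (PySem.Dict (String × String × String) (List (String × String))))
    (r : List (String × String)) :
    PySem.Dict String (PySem.Dict (String × String × String) (List (String × String))) :=
  if ((PySem.Dict.setdefault bk (pvDate r) PySem.Dict.empty).getD (pvDate r)
      PySem.Dict.empty).contains (pvRest r)
  then PySem.Dict.setdefault bk (pvDate r) PySem.Dict.empty
  else PySem.Dict.insert (PySem.Dict.setdefault bk (pvDate r) PySem.Dict.empty) (pvDate r)
    (PySem.Dict.mk (((PySem.Dict.setdefault bk (pvDate r) PySem.Dict.empty).getD (pvDate r)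
      PySem.Dict.empty).items ++ [(pvRest r, r)]))

def pvEntry (M : List (List (String × String))) (d : String) :
    String × PySem.Dict (String × String × String) (List (String × String)) :=
  (d, PySem.Dict.mk ((pvDedupR (pvBucket M d)).map (fun r => (pvRest r, r))))

lemma pv_dedup_append (m : List String) (a : String) :
    PySem.List.dedup (m ++ [a]) = if a ∈ m then PySem.List.dedup m else PySem.List.dedup m ++ [a] := by
  have h2 : PySem.List.dedup (m ++ [a]) = PySem.Set.add (PySem.List.dedup m) a := by
    simp only [PySem.List.dedup, PySem.Set.ofList, List.foldl_append, List.foldl_cons,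
      List.foldl_nil]
  rw [h2]
  by_cases h : a ∈ m
  · rw [if_pos h]
    simp only [PySem.Set.add]
    simp [h]
  · rw [if_neg h]
    simp only [PySem.Set.add]
    simp [h]

lemma pv_contains_map
    (bk : PySem.Dict String (PySem.Dict (String × String × String) (List (String × String))))
    (L : List (List (String × String))) (ks : List String)
    (h : bk.items = ks.map (pvEntry L)) (d : String) :
    bk.contains d = true ↔ d ∈ ks := by
  simp [PySem.Dict.contains, h, pvEntry]

lemma pv_find_entry (L : List (List (String × String))) :
    ∀ (ks : List String) (d : String), d ∈ ks →
    List.find? (fun p => p.1 == d) (ks.map (pvEntry L)) = some (pvEntry L d) := by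
  intro ks
  induction ks with
  | nil => intro d hd; simp at hd
  | cons k ks' ih =>
    intro d hd
    rw [List.map_cons]
    by_cases h : k = d
    · subst h
      exact List.find?_cons_of_pos (by simp [pvEntry])
    · rw [List.find?_cons_of_neg (by simp [pvEntry, h])]
      refine ih d ?_
      rcases List.mem_cons.mp hd with hc | hc
      · exact absurd hc.symm h
      · exact hc

lemma pv_getD_map
    (bk : PySem.Dict String (PySem.Dict (String × String × String) (List (String × String))))
    (L : List (List (String × String))) (ks : List String)
    (h : bk.items = ks.map (pvEntry L)) (d : String) (hd : d ∈ ks) :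
    bk.getD d PySem.Dict.empty
      = PySem.Dict.mk ((pvDedupR (pvBucket L d)).map (fun r => (pvRest r, r))) := by
  simp only [PySem.Dict.getD, PySem.Dict.get?, h]
  rw [pv_find_entry L ks d hd]
  rfl

lemma pv_inner_contains (N : List (List (String × String))) (c : String × String × String) :
    (PySem.Dict.mk (N.map (fun r => (pvRest r, r)))).contains c = true ↔ c ∈ N.map pvRest := by
  simp [PySem.Dict.contains]

lemma pv_step_spec (L : List (List (String × String))) (x : List (String × String))
    (bk : PySem.Dict String (PySem.Dict (String × String × String) (List (String × String))))
    (h : bk.items = (PySem.List.dedup (L.map pvDate)).map (pvEntry L)) :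
    (pvStep bk x).items = (PySem.List.dedup ((L ++ [x]).map pvDate)).map (pvEntry (L ++ [x])) := by
  have hdd : PySem.List.dedup ((L ++ [x]).map pvDate)
      = if pvDate x ∈ L.map pvDate then PySem.List.dedup (L.map pvDate)
        else PySem.List.dedup (L.map pvDate) ++ [pvDate x] := by
    rw [List.map_append]
    simp only [List.map_cons, List.map_nil]
    exact pv_dedup_append _ _
  by_cases hmem : pvDate x ∈ L.map pvDate
  · -- the date of x already has a bucket
    have hmemk : pvDate x ∈ PySem.List.dedup (L.map pvDate) :=
      (PySem.List.mem_dedup _ _).mpr hmem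
    have hcont : bk.contains (pvDate x) = true :=
      (pv_contains_map bk L _ h (pvDate x)).mpr hmemk
    have hsd : PySem.Dict.setdefault bk (pvDate x) PySem.Dict.empty = bk := by
      simp [PySem.Dict.setdefault, hcont]
    have hb : bk.getD (pvDate x) PySem.Dict.empty
        = PySem.Dict.mk ((pvDedupR (pvBucket L (pvDate x))).map (fun r => (pvRest r, r))) :=
      pv_getD_map bk L _ h (pvDate x) hmemk
    rw [hdd, if_pos hmem]
    unfold pvStep
    rw [hsd, hb]
    by_cases hrc : (PySem.Dict.mk ((pvDedupR (pvBucket L (pvDate x))).map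
        (fun r => (pvRest r, r)))).contains (pvRest x) = true
    · -- x's key is already in its bucket: nothing changes
      rw [if_pos hrc, h]
      apply List.map_congr_left
      intro d hd
      unfold pvEntry
      by_cases hddx : d = pvDate x
      · rw [← hddx] at hrc
        have hex : ∃ y ∈ pvBucket L d, pvRest y = pvRest x := by
          have hmm := (pv_inner_contains _ _).mp hrc
          obtain ⟨z, hz, hzc⟩ := List.mem_map.mp hmm
          exact ⟨z, pvDedupR_subset _ _ le_rfl z hz, hzc⟩
        rw [pv_bucket_append, if_pos hddx.symm, pv_dedupR_append_dup x _ _ le_rfl hex]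
      · rw [pv_bucket_append, if_neg (fun hc => hddx hc.symm), List.append_nil]
    · -- x's key is new in its bucket: the bucket of date x grows by x
      rw [if_neg hrc]
      rw [show (PySem.Dict.mk ((pvDedupR (pvBucket L (pvDate x))).map
            (fun r => (pvRest r, r)))).items
          = (pvDedupR (pvBucket L (pvDate x))).map (fun r => (pvRest r, r)) from rfl]
      have hins : (PySem.Dict.insert bk (pvDate x)
          (PySem.Dict.mk ((pvDedupR (pvBucket L (pvDate x))).map (fun r => (pvRest r, r)) ++
            [(pvRest x, x)]))).items
          = bk.items.map (fun p =>
              if p.1 == pvDate x then (pvDate x,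
                PySem.Dict.mk ((pvDedupR (pvBucket L (pvDate x))).map (fun r => (pvRest r, r)) ++
                  [(pvRest x, x)]))
              else p) := by
        simp [PySem.Dict.insert, hcont]
      rw [hins, h, List.map_map]
      apply List.map_congr_left
      intro d hd
      simp only [Function.comp]
      by_cases hddx : d = pvDate x
      · have hfst : ((pvEntry L d).1 == pvDate x) = true := by simp [pvEntry, hddx]
        rw [if_pos hfst]
        have hfresh : ∀ y ∈ pvBucket L (pvDate x), pvRest y ≠ pvRest x := by
          intro y hy hc
          obtain ⟨z, hz, hzc⟩ := pvDedupR_key_surj _ _ _ le_rfl ⟨y, hy, hc⟩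
          exact hrc ((pv_inner_contains _ _).mpr (List.mem_map.mpr ⟨z, hz, hzc⟩))
        unfold pvEntry
        rw [hddx, pv_bucket_append, if_pos rfl, pv_dedupR_append_fresh x _ _ le_rfl hfresh,
            List.map_append]
        simp
      · have hfst : ((pvEntry L d).1 == pvDate x) = false := by simp [pvEntry, hddx]
        rw [if_neg (by rw [hfst]; simp)]
        unfold pvEntry
        rw [pv_bucket_append, if_neg (fun hc => hddx hc.symm), List.append_nil]
  · -- the date of x opens a new bucket at the end
    have hmemk : pvDate x ∉ PySem.List.dedup (L.map pvDate) :=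
      fun hc => hmem ((PySem.List.mem_dedup _ _).mp hc)
    have hcont : bk.contains (pvDate x) = false :=
      Bool.eq_false_iff.mpr (fun hc => hmemk ((pv_contains_map bk L _ h (pvDate x)).mp hc))
    have hsd : PySem.Dict.setdefault bk (pvDate x) PySem.Dict.empty
        = PySem.Dict.mk (bk.items ++ [(pvDate x, PySem.Dict.empty)]) := by
      simp [PySem.Dict.setdefault, hcont]
    have hbempty : pvBucket L (pvDate x) = [] := by
      rw [pvBucket, List.filter_eq_nil_iff]
      intro r hr
      simp only [beq_eq_false_iff_ne, ne_eq, Bool.not_eq_true]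
      intro hc
      exact hmem (List.mem_map.mpr ⟨r, hr, by simpa using hc⟩)
    have hb : (PySem.Dict.mk (bk.items ++ [(pvDate x, PySem.Dict.empty)])).getD (pvDate x)
        PySem.Dict.empty = (PySem.Dict.empty :
          PySem.Dict (String × String × String) (List (String × String))) := by
      simp only [PySem.Dict.getD, PySem.Dict.get?]
      rw [List.find?_append]
      have hnone : List.find? (fun p => p.1 == pvDate x) bk.items = none := by
        rw [List.find?_eq_none]
        intro p hp
        rw [h] at hp
        obtain ⟨k, hk, hke⟩ := List.mem_map.mp hp
        simp only [← hke, pvEntry, beq_iff_eq]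
        exact fun hc => hmemk (hc ▸ hk)
      rw [hnone]
      simp
    unfold pvStep
    rw [hsd, hb]
    have hec : (PySem.Dict.empty :
        PySem.Dict (String × String × String) (List (String × String))).contains (pvRest x)
        = false := rfl
    rw [hec]
    simp only [Bool.false_eq_true, if_false]
    have hcont2 : (PySem.Dict.mk (bk.items ++ [(pvDate x, PySem.Dict.empty)])).contains
        (pvDate x) = true := by
      simp [PySem.Dict.contains]
    have hins : (PySem.Dict.insert (PySem.Dict.mk (bk.items ++ [(pvDate x, PySem.Dict.empty)]))
        (pvDate x) (PySem.Dict.mk ((PySem.Dict.empty : PySem.Dict (String × String × String)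
          (List (String × String))).items ++ [(pvRest x, x)]))).items
        = (bk.items ++ [(pvDate x, PySem.Dict.empty)]).map
            (fun (p : String × PySem.Dict (String × String × String) (List (String × String))) =>
            if p.1 == pvDate x then (pvDate x, PySem.Dict.mk [(pvRest x, x)]) else p) := by
      unfold PySem.Dict.insert
      rw [hcont2, if_pos rfl]
      rfl
    rw [hins, hdd, if_neg hmem, List.map_append, List.map_append, h, List.map_map]
    congr 1
    · apply List.map_congr_left
      intro d hd
      simp only [Function.comp]
      have hddx : d ≠ pvDate x := fun hc => hmemk (hc ▸ hd)
      rw [if_neg (by simp [pvEntry, hddx])]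
      unfold pvEntry
      rw [pv_bucket_append, if_neg (fun hc => hddx hc.symm), List.append_nil]
    · simp only [List.map_cons, List.map_nil, beq_self_eq_true, if_pos]
      unfold pvEntry
      rw [pv_bucket_append, if_pos rfl, hbempty, List.nil_append]
      rw [pvDedupR_cons, List.filter_nil, pvDedupR_nil]
      simp

-- characterization of B's grouping fold
lemma pv_buckets_spec : ∀ (L : List (List (String × String))),
    (L.foldl pvStep PySem.Dict.empty).items = (PySem.List.dedup (L.map pvDate)).map (pvEntry L) := by
  intro L
  induction L using List.reverseRecOn with
  | nil => rfl
  | append_singleton L x ih =>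
    rw [List.foldl_append, List.foldl_cons, List.foldl_nil]
    exact pv_step_spec L x _ ih

-- ===== VERDICT (by name: the statement is the Claim_ definition above) =====
theorem merge_retours_py_spec : Claim_equal_merge_retours_py := by
  intro existants nouveaux _
  show merge_retours_py existants nouveaux = merge_retours_py_alt existants nouveaux
  have hA : merge_retours_py existants nouveaux
      = PySem.List.slice (PySem.List.sorted (pvDedup (existants ++ nouveaux)) pvDate true)
          none (some 20) := by
    unfold merge_retours_py
    rw [pv_date_lam, pv_loopA (existants ++ nouveaux) PySem.Set.empty []]
    have h1 : (existants ++ nouveaux).filter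
        (fun r => !(PySem.Set.contains (PySem.Set.empty :
          PySem.Set (String × String × String × String)) (pvKeyA r)))
        = existants ++ nouveaux := List.filter_eq_self.mpr (fun r _ => rfl)
    rw [h1, List.nil_append]
  have hB : merge_retours_py_alt existants nouveaux
      = PySem.List.slice
          ((PySem.List.sorted ((existants ++ nouveaux).foldl pvStep PySem.Dict.empty).keys
            (fun x => x) true).foldl
            (fun acc d => acc ++ (((existants ++ nouveaux).foldl pvStep
              PySem.Dict.empty).getD d PySem.Dict.empty).values) [])
          none (some 20) := rfl
  rw [hA, hB]
  have hitems := pv_buckets_spec (existants ++ nouveaux)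
  have hkeys : ((existants ++ nouveaux).foldl pvStep PySem.Dict.empty).keys
      = PySem.List.dedup ((existants ++ nouveaux).map pvDate) := by
    simp only [PySem.Dict.keys]
    rw [hitems, List.map_map]
    have hc : ((fun (x : String × PySem.Dict (String × String × String)
        (List (String × String))) => x.1) ∘ pvEntry (existants ++ nouveaux))
        = fun d => d := funext (fun d => rfl)
    rw [hc]
    simp
  rw [hkeys, PySem.List.foldl_append_eq_flatMap, List.nil_append]
  refine congrArg (fun l => PySem.List.slice l none (some 20)) ?_
  have hp : ∀ a b, pvKeyA a = pvKeyA b →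
      ∀ (d : String), (pvDate a == d) = (pvDate b == d) := by
    intro a b hk d
    rw [pv_keyA_pair, pv_keyA_pair] at hk
    injection hk with h1 h2
    rw [h1]
  have hforall : ∀ d ∈ PySem.List.sorted
      (PySem.List.dedup ((existants ++ nouveaux).map pvDate)) (fun x => x) true,
      (((existants ++ nouveaux).foldl pvStep PySem.Dict.empty).getD d PySem.Dict.empty).values
      = pvBucket (pvDedup (existants ++ nouveaux)) d := by
    intro d hd
    have hdk : d ∈ PySem.List.dedup ((existants ++ nouveaux).map pvDate) :=
      (PySem.List.mem_sorted _ _ _ _).mp hd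
    rw [pv_getD_map _ _ _ hitems d hdk]
    have hv : (PySem.Dict.mk ((pvDedupR (pvBucket (existants ++ nouveaux) d)).map
        (fun r => (pvRest r, r)))).values = pvDedupR (pvBucket (existants ++ nouveaux) d) := by
      simp only [PySem.Dict.values, List.map_map]
      have hc : (((fun (x : (String × String × String) × List (String × String)) => x.2)) ∘
          (fun (r : List (String × String)) => (pvRest r, r))) = fun r => r := funext (fun r => rfl)
      rw [hc]
      simp
    rw [hv, pvDedupR_eq_pvDedup _ _ d le_rfl (pv_bucket_mem_date _ d)]
    exact (pv_filter_dedup (fun r => pvDate r == d) (fun a b hk => hp a b hk d)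
      _ _ le_rfl).symm
  rw [pv_flatMap_congr _ _ _ hforall]
  have ksnd : (PySem.List.dedup ((existants ++ nouveaux).map pvDate)).Nodup :=
    PySem.Set.nodup_ofList _
  have h1 := PySem.List.sorted_pairwise_rev
    (PySem.List.dedup ((existants ++ nouveaux).map pvDate)) (fun x => x)
  have hnd : (PySem.List.sorted (PySem.List.dedup ((existants ++ nouveaux).map pvDate))
      (fun x => x) true).Nodup :=
    (PySem.List.sorted_perm _ _ true).symm.nodup ksnd
  have hpw : (PySem.List.sorted (PySem.List.dedup ((existants ++ nouveaux).map pvDate))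
      (fun x => x) true).Pairwise (fun a b => b < a) :=
    (h1.and hnd).imp (fun hab => lt_of_le_of_ne hab.1 (Ne.symm hab.2))
  have hcov : ∀ r ∈ pvDedup (existants ++ nouveaux),
      pvDate r ∈ PySem.List.sorted (PySem.List.dedup ((existants ++ nouveaux).map pvDate))
        (fun x => x) true := by
    intro r hr
    exact (PySem.List.mem_sorted _ _ _ _).mpr ((PySem.List.mem_dedup _ _).mpr
      (List.mem_map.mpr ⟨r, pvDedup_subset _ _ le_rfl r hr, rfl⟩))
  exact pv_sorted_flatMap (pvDedup (existants ++ nouveaux)) _ hpw hcov
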